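-- pv_equiv track=rewrite | github.com/HeshamFS/swarmweaver | hooks/security.py | _split_on_pipes
-- ===== SOURCE A (Python) =====
-- def _split_on_pipes(command: str) -> list[str]:
--     """
--     Split a command on pipe characters (|) while respecting quotes.
--     Returns the individual pipe stages.
--     """
--     parts = []
--     current = []
--     in_single = False
--     in_double = False
--     escape = False
--     i = 0
--
--     while i < len(command):
--         ch = command[i]
--
--         if escape:
--             current.append(ch)
--             escape = False
--             i += 1
--             continue
--
--         if ch == "\\":
--             escape = True
--             current.append(ch)
--             i += 1
--             continue
--
--         if ch == "'" and not in_double: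
--             in_single = not in_single
--             current.append(ch)
--         elif ch == '"' and not in_single:
--             in_double = not in_double
--             current.append(ch)
--         elif ch == "|" and not in_single and not in_double:
--             # Check it's not || (logical OR)
--             if i + 1 < len(command) and command[i + 1] == "|":
--                 current.append("||")
--                 i += 2
--                 continue
--             parts.append("".join(current).strip())
--             current = []
--         else:
--             current.append(ch)
--
--         i += 1
--
--     remaining = "".join(current).strip()
--     if remaining:
--         parts.append(remaining)
--
--     return parts
-- ===== SOURCE B (Python) =====
-- def _split_on_pipes(command: str) -> list[str]:
--     # Index-collection pass: record the position of each splitting '|', then slice.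
--     cuts = []
--     in_single = in_double = escape = False
--     n = len(command)
--     i = 0
--     while i < n:
--         ch = command[i]
--         if escape:
--             escape = False
--         elif ch == "\\":
--             escape = True
--         elif ch == "'" and not in_double:
--             in_single = not in_single
--         elif ch == '"' and not in_single:
--             in_double = not in_double
--         elif ch == "|" and not in_single and not in_double:
--             if i + 1 < n and command[i + 1] == "|":
--                 i += 2
--                 continue
--             cuts.append(i)
--         i += 1
--     starts = [0] + [c + 1 for c in cuts]
--     ends = cuts + [n]
--     stages = [command[a:b].strip() for a, b in zip(starts, ends)]
--     parts = stages[:-1]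
--     if stages[-1]:
--         parts.append(stages[-1])
--     return parts
-- ===== Notes on version B (the rewrite author's own statement) =====
-- stated objective: alternative
-- what changed: A accumulates each stage char-by-char into a buffer during the quote/escape scan; B's scan only records the index of each splitting pipe and a second pass slices the command between consecutive cut indices, stripping each slice and dropping only a blank last stage.
import Mathlib
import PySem

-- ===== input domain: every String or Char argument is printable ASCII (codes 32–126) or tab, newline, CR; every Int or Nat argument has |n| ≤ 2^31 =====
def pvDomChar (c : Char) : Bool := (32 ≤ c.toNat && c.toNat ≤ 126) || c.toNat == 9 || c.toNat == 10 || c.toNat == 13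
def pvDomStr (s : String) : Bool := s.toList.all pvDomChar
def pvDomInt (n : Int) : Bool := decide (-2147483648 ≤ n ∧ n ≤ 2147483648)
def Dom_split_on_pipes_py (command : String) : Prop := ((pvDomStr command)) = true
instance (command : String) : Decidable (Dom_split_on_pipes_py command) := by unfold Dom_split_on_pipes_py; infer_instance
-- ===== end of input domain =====

-- B re-implements A's single buffer-accumulating scan as an index-collection pass (record each
-- splitting '|' position) followed by a slicing pass; alternative decomposition, same linear cost.

-- ===== PORT A =====
-- A's while-loop: state (parts, current, in_single, in_double, escape) over the remaining chars;
-- the lookahead `i + 1 < len(command) and command[i+1] == '|'` is `cs.head? = some '|'`, and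
-- `i += 2; continue` consumes the lookahead character too (`cs.tail`).
def pvALoop : List String → List Char → Bool → Bool → Bool → List Char → List String
  | parts, cur, _, _, _, [] =>
      let remaining := PySem.Str.strip (String.ofList cur)
      if remaining ≠ "" then parts ++ [remaining] else parts
  | parts, cur, ins, ind, esc, c :: cs =>
      if esc then pvALoop parts (cur ++ [c]) ins ind false cs
      else if c = '\\' then pvALoop parts (cur ++ [c]) ins ind true cs
      else if c = '\'' ∧ ind = false then pvALoop parts (cur ++ [c]) (!ins) ind esc cs
      else if c = '"' ∧ ins = false then pvALoop parts (cur ++ [c]) ins (!ind) esc cs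
      else if c = '|' ∧ ins = false ∧ ind = false then
        if cs.head? = some '|' then pvALoop parts (cur ++ ['|', '|']) ins ind esc cs.tail
        else pvALoop (parts ++ [PySem.Str.strip (String.ofList cur)]) [] ins ind esc cs
      else pvALoop parts (cur ++ [c]) ins ind esc cs
  termination_by _ _ _ _ _ cs => cs.length
  decreasing_by all_goals simp

def split_on_pipes_py (command : String) : List String :=
  pvALoop [] [] false false false command.toList

-- ===== PORT B =====
-- B's first pass: the same quote/escape state machine, but it only records the index of each
-- splitting '|' (p is the running index i; the '||' branch skips two positions).
def pvCuts : Nat → Bool → Bool → Bool → List Char → List Nat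
  | _, _, _, _, [] => []
  | p, ins, ind, esc, c :: cs =>
      if esc then pvCuts (p + 1) ins ind false cs
      else if c = '\\' then pvCuts (p + 1) ins ind true cs
      else if c = '\'' ∧ ind = false then pvCuts (p + 1) (!ins) ind esc cs
      else if c = '"' ∧ ins = false then pvCuts (p + 1) ins (!ind) esc cs
      else if c = '|' ∧ ins = false ∧ ind = false then
        if cs.head? = some '|' then pvCuts (p + 2) ins ind esc cs.tail
        else p :: pvCuts (p + 1) ins ind esc cs
      else pvCuts (p + 1) ins ind esc cs
  termination_by _ _ _ _ cs => cs.length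
  decreasing_by all_goals simp

-- Source B's slices command[a:b] all have natural bounds 0 ≤ a, b ≤ n, where the Python slice is
-- exactly clamped drop/take (PySem.List.slice_natCast); .strip() is PySem.Str.strip.
def split_on_pipes_py_alt (command : String) : List String :=
  let L := command.toList
  let ks := pvCuts 0 false false false L
  let starts := 0 :: ks.map (· + 1)
  let ends := ks ++ [L.length]
  let stages := (List.zip starts ends).map
    (fun ab => PySem.Str.strip (String.ofList ((L.drop ab.1).take (ab.2 - ab.1))))
  let parts := stages.dropLast
  match stages.getLast? with
  | some last => if last ≠ "" then parts ++ [last] else parts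
  | none => parts

-- ===== PRECONDITION & SPEC =====
def Spec_split_on_pipes_py (command : String) (out : List String) : Prop := out = split_on_pipes_py_alt command
instance (command : String) (out : List String) : Decidable (Spec_split_on_pipes_py command out) := by unfold Spec_split_on_pipes_py; infer_instance

-- ===== CLAIM (what is proved, stated in full; the proofs are below) =====
def Claim_equal_split_on_pipes_py : Prop := ∀ (command : String), Dom_split_on_pipes_py command → Spec_split_on_pipes_py command (split_on_pipes_py command)

-- ===== LEMMAS AND PROOFS =====

-- the common skeleton: the raw (un-stripped) pipe stages of the remaining characters,
-- as (first stage, later stages)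
def pvSegs : Bool → Bool → Bool → List Char → List Char × List (List Char)
  | _, _, _, [] => ([], [])
  | ins, ind, esc, c :: cs =>
      if esc then ((pvSegs ins ind false cs).1.cons c, (pvSegs ins ind false cs).2)
      else if c = '\\' then ((pvSegs ins ind true cs).1.cons c, (pvSegs ins ind true cs).2)
      else if c = '\'' ∧ ind = false then ((pvSegs (!ins) ind esc cs).1.cons c, (pvSegs (!ins) ind esc cs).2)
      else if c = '"' ∧ ins = false then ((pvSegs ins (!ind) esc cs).1.cons c, (pvSegs ins (!ind) esc cs).2)
      else if c = '|' ∧ ins = false ∧ ind = false then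
        if cs.head? = some '|' then
          ('|' :: '|' :: (pvSegs ins ind esc cs.tail).1, (pvSegs ins ind esc cs.tail).2)
        else ([], (pvSegs ins ind esc cs).1 :: (pvSegs ins ind esc cs).2)
      else ((pvSegs ins ind esc cs).1.cons c, (pvSegs ins ind esc cs).2)
  termination_by _ _ _ cs => cs.length
  decreasing_by all_goals simp

-- assemble the final list from raw stages: strip all, keep intermediates, drop a blank last
def pvFinish : List Char → List (List Char) → List String
  | h, [] => if PySem.Str.strip (String.ofList h) ≠ "" then [PySem.Str.strip (String.ofList h)] else []
  | h, h2 :: t => PySem.Str.strip (String.ofList h) :: pvFinish h2 t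

-- raw stages cut out of L by the absolute cut positions ks (B's slicing pass, un-stripped)
def pvStages (L : List Char) (ks : List Nat) : List (List Char) :=
  (List.zip (0 :: ks.map (· + 1)) (ks ++ [L.length])).map (fun ab => (L.drop ab.1).take (ab.2 - ab.1))

lemma mapshift (a b : Nat) (ks : List Nat) :
    (ks.map (· + a)).map (· + b) = ks.map (· + (a + b)) := by
  rw [List.map_map]
  exact List.map_congr_left (fun x _ => by simp [Function.comp]; omega)

lemma pvCuts_shift (ins ind esc : Bool) (cs : List Char) :
    ∀ p, pvCuts p ins ind esc cs = (pvCuts 0 ins ind esc cs).map (· + p) := by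
  induction ins, ind, esc, cs using pvSegs.induct with
  | case1 => intro p; simp [pvCuts]
  | case2 ins ind c cs ih =>
      intro p
      simp only [pvCuts, if_true]
      rw [ih (p + 1), ih 1, mapshift, Nat.add_comm]
  | case3 ins ind esc cs hesc ih =>
      intro p
      rw [Bool.not_eq_true] at hesc; subst hesc
      simp [pvCuts]
      rw [ih (p + 1), ih 1, mapshift, Nat.add_comm]
  | case4 ins ind esc c cs hesc hbs hq ih =>
      intro p
      rw [Bool.not_eq_true] at hesc; subst hesc
      obtain ⟨hc, hind⟩ := hq; subst hc hind
      simp [pvCuts]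
      rw [ih (p + 1), ih 1, mapshift, Nat.add_comm]
  | case5 ins ind esc c cs hesc hbs hq hd ih =>
      intro p
      rw [Bool.not_eq_true] at hesc; subst hesc
      obtain ⟨hc, hins⟩ := hd; subst hc hins
      simp [pvCuts]
      rw [ih (p + 1), ih 1, mapshift, Nat.add_comm]
  | case6 ins ind esc c cs hesc hbs hq hd hp hh ih =>
      intro p
      rw [Bool.not_eq_true] at hesc; subst hesc
      obtain ⟨hc, hins, hind⟩ := hp; subst hc hins hind
      simp [pvCuts, hh]
      rw [ih (p + 2), ih 2, mapshift, Nat.add_comm]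
  | case7 ins ind esc c cs hesc hbs hq hd hp hh ih =>
      intro p
      rw [Bool.not_eq_true] at hesc; subst hesc
      obtain ⟨hc, hins, hind⟩ := hp; subst hc hins hind
      simp [pvCuts, hh]
      rw [ih (p + 1), ih 1, mapshift, Nat.add_comm]
  | case8 ins ind esc c cs hesc hbs hq hd hp ih =>
      intro p
      rw [Bool.not_eq_true] at hesc; subst hesc
      simp only [pvCuts, hbs, hq, hd, hp, if_false, Bool.false_eq_true]
      rw [ih (p + 1), ih 1, mapshift, Nat.add_comm]

lemma pvSlice_shift (c : Char) (L : List Char) (xs : List Nat) :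
    ∀ es : List Nat,
      (List.zip (xs.map (· + 1)) (es.map (· + 1))).map
          (fun ab => ((c :: L).drop ab.1).take (ab.2 - ab.1)) =
        (List.zip xs es).map (fun ab => (L.drop ab.1).take (ab.2 - ab.1)) := by
  induction xs with
  | nil => intro es; simp
  | cons x xs ih =>
      intro es
      cases es with
      | nil => simp
      | cons e es => simp [ih es]

lemma pvStages_shift (c : Char) (L : List Char) (ks : List Nat) :
    pvStages (c :: L) (ks.map (· + 1)) = (pvStages L ks).modifyHead (c :: ·) := by
  obtain ⟨e, es, hE⟩ : ∃ e es, ks ++ [L.length] = e :: es := by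
    cases ks <;> exact ⟨_, _, rfl⟩
  have h2 : List.map (· + 1) ks ++ [(c :: L).length] = (e + 1) :: List.map (· + 1) es := by
    have : List.map (· + 1) ks ++ [(c :: L).length] = List.map (· + 1) (ks ++ [L.length]) := by simp
    rw [this, hE, List.map_cons]
  unfold pvStages
  rw [h2, hE]
  simp only [List.zip_cons_cons, List.map_cons, List.modifyHead_cons, Nat.sub_zero,
    List.take_succ_cons, List.drop_zero]
  congr 1
  exact pvSlice_shift c L (ks.map (· + 1)) es

lemma pvStages_cut (c : Char) (L : List Char) (ks : List Nat) :
    pvStages (c :: L) (0 :: ks.map (· + 1)) = [] :: pvStages L ks := by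
  have h2 : (0 :: List.map (· + 1) ks) ++ [(c :: L).length] =
      0 :: List.map (· + 1) (ks ++ [L.length]) := by simp
  unfold pvStages
  rw [h2]
  simp only [List.map_cons, List.zip_cons_cons, List.map_cons, Nat.sub_zero, List.take_zero,
    List.drop_zero]
  congr 1
  exact pvSlice_shift c L (0 :: ks.map (· + 1)) (ks ++ [L.length])

lemma pvStages_eq_segs (ins ind esc : Bool) (cs : List Char) :
    pvStages cs (pvCuts 0 ins ind esc cs) =
      (pvSegs ins ind esc cs).1 :: (pvSegs ins ind esc cs).2 := by
  induction ins, ind, esc, cs using pvSegs.induct with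
  | case1 => simp [pvCuts, pvSegs, pvStages]
  | case2 ins ind c cs ih =>
      simp only [pvCuts, pvSegs, if_true]
      rw [pvCuts_shift, pvStages_shift, ih]
      simp
  | case3 ins ind esc cs hesc ih =>
      rw [Bool.not_eq_true] at hesc; subst hesc
      simp only [pvCuts, pvSegs]
      simp
      rw [pvCuts_shift, pvStages_shift, ih]
      simp
  | case4 ins ind esc c cs hesc hbs hq ih =>
      rw [Bool.not_eq_true] at hesc; subst hesc
      obtain ⟨hc, hind⟩ := hq; subst hc hind
      simp only [pvCuts, pvSegs, hbs]
      simp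
      rw [pvCuts_shift, pvStages_shift, ih]
      simp
  | case5 ins ind esc c cs hesc hbs hq hd ih =>
      rw [Bool.not_eq_true] at hesc; subst hesc
      obtain ⟨hc, hins⟩ := hd; subst hc hins
      simp only [pvCuts, pvSegs, hbs, hq]
      simp
      rw [pvCuts_shift, pvStages_shift, ih]
      simp
  | case6 ins ind esc c cs hesc hbs hq hd hp hh ih =>
      rw [Bool.not_eq_true] at hesc; subst hesc
      obtain ⟨hc, hins, hind⟩ := hp; subst hc hins hind
      cases cs with
      | nil => simp at hh
      | cons d cs2 =>
          have hd2 : d = '|' := by simpa using hh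
          subst hd2
          simp only [pvCuts, pvSegs, hh, List.tail_cons]
          simp
          rw [pvCuts_shift, ← mapshift 1 1, pvStages_shift, pvStages_shift]
          simp only [List.tail_cons] at ih
          rw [ih]
          simp
  | case7 ins ind esc c cs hesc hbs hq hd hp hh ih =>
      rw [Bool.not_eq_true] at hesc; subst hesc
      obtain ⟨hc, hins, hind⟩ := hp; subst hc hins hind
      simp only [pvCuts, pvSegs, hh]
      simp
      rw [pvCuts_shift, pvStages_cut, ih]
  | case8 ins ind esc c cs hesc hbs hq hd hp ih =>
      rw [Bool.not_eq_true] at hesc; subst hesc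
      simp only [pvCuts, pvSegs, hbs, hq, hd, hp, if_false, Bool.false_eq_true]
      rw [pvCuts_shift, pvStages_shift, ih]
      simp

lemma pvALoop_eq (ins ind esc : Bool) (cs : List Char) :
    ∀ parts cur, pvALoop parts cur ins ind esc cs =
      parts ++ pvFinish (cur ++ (pvSegs ins ind esc cs).1) (pvSegs ins ind esc cs).2 := by
  induction ins, ind, esc, cs using pvSegs.induct with
  | case1 =>
      intro parts cur
      simp only [pvALoop, pvSegs, pvFinish, List.append_nil]
      split <;> simp
  | case2 ins ind c cs ih =>
      intro parts cur
      simp only [pvALoop, pvSegs, if_true]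
      rw [ih]
      simp
  | case3 ins ind esc cs hesc ih =>
      intro parts cur
      rw [Bool.not_eq_true] at hesc; subst hesc
      simp only [pvALoop, pvSegs]
      simp
      rw [ih]
      simp
  | case4 ins ind esc c cs hesc hbs hq ih =>
      intro parts cur
      rw [Bool.not_eq_true] at hesc; subst hesc
      obtain ⟨hc, hind⟩ := hq; subst hc hind
      simp only [pvALoop, pvSegs, hbs]
      simp
      rw [ih]
      simp
  | case5 ins ind esc c cs hesc hbs hq hd ih =>
      intro parts cur
      rw [Bool.not_eq_true] at hesc; subst hesc
      obtain ⟨hc, hins⟩ := hd; subst hc hins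
      simp only [pvALoop, pvSegs, hbs, hq]
      simp
      rw [ih]
      simp
  | case6 ins ind esc c cs hesc hbs hq hd hp hh ih =>
      intro parts cur
      rw [Bool.not_eq_true] at hesc; subst hesc
      obtain ⟨hc, hins, hind⟩ := hp; subst hc hins hind
      simp only [pvALoop, pvSegs, hh]
      simp
      rw [ih]
      simp
  | case7 ins ind esc c cs hesc hbs hq hd hp hh ih =>
      intro parts cur
      rw [Bool.not_eq_true] at hesc; subst hesc
      obtain ⟨hc, hins, hind⟩ := hp; subst hc hins hind
      simp only [pvALoop, pvSegs, hh]
      simp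
      rw [ih]
      simp [pvFinish]
  | case8 ins ind esc c cs hesc hbs hq hd hp ih =>
      intro parts cur
      rw [Bool.not_eq_true] at hesc; subst hesc
      simp only [pvALoop, pvSegs, hbs, hq, hd, hp, if_false, Bool.false_eq_true]
      rw [ih]
      simp

lemma pvFinish_assemble (h : List Char) (t : List (List Char)) :
    (match (PySem.Str.strip (String.ofList h) :: t.map (fun seg => PySem.Str.strip (String.ofList seg))).getLast? with
     | some last => if last ≠ "" then (PySem.Str.strip (String.ofList h) :: t.map (fun seg => PySem.Str.strip (String.ofList seg))).dropLast ++ [last]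
                    else (PySem.Str.strip (String.ofList h) :: t.map (fun seg => PySem.Str.strip (String.ofList seg))).dropLast
     | none => (PySem.Str.strip (String.ofList h) :: t.map (fun seg => PySem.Str.strip (String.ofList seg))).dropLast) = pvFinish h t := by
  induction t generalizing h with
  | nil => simp only [List.map_nil, pvFinish]; split <;> simp_all
  | cons h2 t2 ih =>
      specialize ih h2
      simp only [List.map_cons] at ih ⊢
      rw [List.getLast?_cons_cons]
      cases hl : (PySem.Str.strip (String.ofList h2) :: List.map (fun seg => PySem.Str.strip (String.ofList seg)) t2).getLast? with
      | none => simp at hl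
      | some last =>
          rw [hl] at ih
          simp only [pvFinish, ← ih]
          split <;> simp

-- ===== VERDICT (by name: the statement is the Claim_ definition above) =====
theorem split_on_pipes_py_spec : Claim_equal_split_on_pipes_py := by
  intro command _
  unfold Spec_split_on_pipes_py split_on_pipes_py split_on_pipes_py_alt
  rw [pvALoop_eq]
  have hst : (List.zip (0 :: (pvCuts 0 false false false command.toList).map (· + 1))
      (pvCuts 0 false false false command.toList ++ [command.toList.length])).map
      (fun ab => PySem.Str.strip (String.ofList ((command.toList.drop ab.1).take (ab.2 - ab.1)))) =
      ((pvSegs false false false command.toList).1 :: (pvSegs false false false command.toList).2).map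
        (fun seg => PySem.Str.strip (String.ofList seg)) := by
    rw [← pvStages_eq_segs]
    unfold pvStages
    rw [List.map_map]
    rfl
  simp only [hst, List.map_cons]
  rw [pvFinish_assemble]
  simp
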